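-- pv_equiv track=rewrite | github.com/gtrivedi88/content-editorial-assistant | app/services/parsing/html_parser.py | _build_inline_char_map
-- ===== SOURCE A (Python) =====
-- def _build_inline_char_map(content: str, inline_content: str) -> list[int]:
--     """Build a char_map from *content* positions to *inline_content* positions.
--
--     The two strings differ by backtick wrappers around code terms and
--     ``**`` wrappers around bold terms.  Walks both in parallel, skipping
--     inserted markers in inline_content.
--     """
--     char_map: list[int] = []
--     j = 0
--     for _ in range(len(content)):
--         while j < len(inline_content):
--             ch = inline_content[j]
--             if ch == "`":
--                 j += 1
--             elif (
--                 ch == "*"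
--                 and j + 1 < len(inline_content)
--                 and inline_content[j + 1] == "*"
--             ):
--                 j += 2
--             else:
--                 break
--         if j < len(inline_content):
--             char_map.append(j)
--             j += 1
--         else:
--             char_map.append(max(0, len(inline_content) - 1))
--     return char_map
-- ===== SOURCE B (Python) =====
-- def _build_inline_char_map(content: str, inline_content: str) -> list[int]:
--     """Two-pass version: precompute real (non-marker) positions in
--     inline_content, then map each content index through that table."""
--     n = len(inline_content)
--     real: list[int] = []
--     j = 0
--     while j < n:
--         ch = inline_content[j]
--         if ch == "`":
--             j += 1
--         elif ch == "*" and j + 1 < n and inline_content[j + 1] == "*":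
--             j += 2
--         else:
--             real.append(j)
--             j += 1
--     fallback = max(0, n - 1)
--     return [real[i] if i < len(real) else fallback for i in range(len(content))]
-- ===== Notes on version B (the rewrite author's own statement) =====
-- stated objective: alternative
-- what changed: Replaces the interleaved parallel walk (for each content char, a nested skip-while over inline_content) with two independent passes: one scan of inline_content precomputing the table of real-character positions, then a comprehension mapping each content index through that table with the same fallback.
import Mathlib
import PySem

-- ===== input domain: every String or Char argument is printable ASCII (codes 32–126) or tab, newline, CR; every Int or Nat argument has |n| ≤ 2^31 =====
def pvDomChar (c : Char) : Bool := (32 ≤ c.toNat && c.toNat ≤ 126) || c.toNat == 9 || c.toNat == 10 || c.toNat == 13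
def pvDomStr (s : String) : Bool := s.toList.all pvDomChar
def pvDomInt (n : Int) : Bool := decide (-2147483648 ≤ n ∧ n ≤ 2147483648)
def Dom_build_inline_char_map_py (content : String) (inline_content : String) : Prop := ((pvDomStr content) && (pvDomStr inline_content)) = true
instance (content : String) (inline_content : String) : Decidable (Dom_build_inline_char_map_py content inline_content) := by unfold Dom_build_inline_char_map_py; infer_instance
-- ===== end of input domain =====

-- B replaces A's interleaved walk with a precomputed real-position table plus a mapping pass (alternative decomposition, same cost).

-- ===== PORT A =====
-- the inner 'while j < len(inline_content): … break' marker-skip loop of A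
def pvSkipA (s : List Char) (j : Nat) : Nat :=
  if h : j < s.length then
    let ch := s[j]!
    if ch = '`' then pvSkipA s (j + 1)
    else if ch = '*' ∧ j + 1 < s.length ∧ s[j+1]! = '*' then pvSkipA s (j + 2)
    else j
  else j
termination_by s.length - j
decreasing_by all_goals omega

-- the 'for _ in range(len(content))' loop, recursing on the remaining iteration count
def pvLoopA (s : List Char) (k : Nat) (j : Nat) : List Int :=
  match k with
  | 0 => []
  | k + 1 =>
    let j' := pvSkipA s j
    if j' < s.length then (j' : Int) :: pvLoopA s k (j' + 1)
    else (max 0 ((s.length : Int) - 1)) :: pvLoopA s k j'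

def build_inline_char_map_py (content : String) (inline_content : String) : List Int :=
  pvLoopA inline_content.toList content.length 0

-- ===== PORT B =====
-- first pass of B: the positions of all real (non-marker) characters of inline_content
def pvRealPos (s : List Char) (j : Nat) : List Int :=
  if h : j < s.length then
    let ch := s[j]!
    if ch = '`' then pvRealPos s (j + 1)
    else if ch = '*' ∧ j + 1 < s.length ∧ s[j+1]! = '*' then pvRealPos s (j + 2)
    else (j : Int) :: pvRealPos s (j + 1)
  else []
termination_by s.length - j
decreasing_by all_goals omega

def build_inline_char_map_py_alt (content : String) (inline_content : String) : List Int :=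
  let s := inline_content.toList
  let real := pvRealPos s 0
  let fallback := max 0 ((s.length : Int) - 1)
  (List.range content.length).map (fun i => real.getD i fallback)

-- ===== PRECONDITION & SPEC =====
def Spec_build_inline_char_map_py (content : String) (inline_content : String) (out : List Int) : Prop := out = build_inline_char_map_py_alt content inline_content
instance (content : String) (inline_content : String) (out : List Int) : Decidable (Spec_build_inline_char_map_py content inline_content out) := by unfold Spec_build_inline_char_map_py; infer_instance

-- ===== CLAIM (what is proved, stated in full; the proofs are below) =====
def Claim_equal_build_inline_char_map_py : Prop := ∀ (content : String) (inline_content : String), Dom_build_inline_char_map_py content inline_content → Spec_build_inline_char_map_py content inline_content (build_inline_char_map_py content inline_content)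

-- ===== LEMMAS AND PROOFS =====

-- skipping markers is idempotent for the real-position table, and the position it
-- stops at is a real character (or the end): one unfolding of pvRealPos at j.
theorem pvRealPos_skip (s : List Char) (j : Nat) :
    pvRealPos s j =
      (if pvSkipA s j < s.length then ((pvSkipA s j : Int)) :: pvRealPos s (pvSkipA s j + 1) else []) := by
  generalize hfuel : s.length - j = fuel
  induction fuel using Nat.strong_induction_on generalizing j with
  | _ fuel ih =>
    rw [pvRealPos, pvSkipA]
    by_cases h : j < s.length
    · simp only [dif_pos h]
      by_cases h1 : s[j]! = '`'
      · simp only [if_pos h1]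
        exact ih (s.length - (j + 1)) (by omega) (j + 1) rfl
      · simp only [if_neg h1]
        by_cases h2 : s[j]! = '*' ∧ j + 1 < s.length ∧ s[j+1]! = '*'
        · simp only [if_pos h2]
          exact ih (s.length - (j + 2)) (by omega) (j + 2) rfl
        · simp only [if_neg h2, if_pos h]
    · simp only [dif_neg h]
      have : ¬ j < s.length := h
      simp [this]

theorem pvLoopA_eq_map (s : List Char) (k : Nat) (j : Nat) :
    pvLoopA s k j = (List.range k).map (fun i => (pvRealPos s j).getD i (max 0 ((s.length : Int) - 1))) := by
  induction k generalizing j with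
  | zero => simp [pvLoopA]
  | succ k ih =>
    rw [pvLoopA, List.range_succ_eq_map, List.map_cons, List.map_map]
    by_cases h : pvSkipA s j < s.length
    · simp only [if_pos h]
      rw [pvRealPos_skip s j, if_pos h]
      simp only [List.getD_cons_zero]
      rw [ih (pvSkipA s j + 1)]
      congr 1
    · simp only [if_neg h]
      rw [pvRealPos_skip s j, if_neg h]
      have hj' : pvRealPos s (pvSkipA s j) = [] := by
        rw [pvRealPos_skip s (pvSkipA s j)]
        have : pvSkipA s (pvSkipA s j) = pvSkipA s j := by
          rw [pvSkipA]; simp [Nat.not_lt.mp h, dif_neg]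
        rw [this, if_neg h]
      rw [ih (pvSkipA s j), hj']
      simp only [List.getD, List.getElem?_nil, Option.getD_none, Function.comp_def]

-- ===== VERDICT (by name: the statement is the Claim_ definition above) =====
theorem build_inline_char_map_py_spec : Claim_equal_build_inline_char_map_py := by
  intro content inline_content _
  unfold Spec_build_inline_char_map_py build_inline_char_map_py build_inline_char_map_py_alt
  exact pvLoopA_eq_map _ _ _
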